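-- pv_equiv track=rewrite | github.com/GreatWizard/vscode-grammalecte | grammalecte/text.py | createParagraphWithLines
-- ===== SOURCE A (Python) =====
-- def createParagraphWithLines (lLine):
--     "Returns a text as merged lines and a set of data about lines (line_number_y, start_x, end_x)"
--     sText = ""
--     lLineSet = []
--     nLine = 1
--     n = 0
--     for iLineNumber, sLine in lLine:
--         sLine = sLine.rstrip("\r\n")
--         if nLine < len(lLine) and not sLine.endswith((" ", " ", "-", "–", "—")):
--             sLine += " "
--         lLineSet.append((iLineNumber, n, n + len(sLine)))
--         n += len(sLine)
--         sText += sLine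
--         nLine += 1
--     return sText, lLineSet
-- ===== SOURCE B (Python) =====
-- def createParagraphWithLines (lLine):
--     "Returns a text as merged lines and a set of data about lines (line_number_y, start_x, end_x)"
--     last = len(lLine) - 1
--     lProcessed = []
--     for i, (_, sLine) in enumerate(lLine):
--         s = sLine.rstrip("\r\n")
--         if i != last and not s.endswith((" ", "\xa0", "-", "\u2013", "\u2014")):
--             s += " "
--         lProcessed.append(s)
--     starts = [0]
--     n = 0
--     for s in lProcessed:
--         n += len(s)
--         starts.append(n)
--     lLineSet = [(iLineNumber, start, start + len(s))
--                 for (iLineNumber, _), (s, start) in zip(lLine, zip(lProcessed, starts))]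
--     return "".join(lProcessed), lLineSet
-- ===== Notes on version B (the rewrite author's own statement) =====
-- stated objective: alternative
-- what changed: Replaces A's single running-offset accumulator loop (four mutable state variables) with a three-stage pipeline: build the list of processed line strings, compute start offsets as a separate prefix-sum pass, then zip lines, processed strings and starts into the metadata tuples and join the strings.
import Mathlib
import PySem

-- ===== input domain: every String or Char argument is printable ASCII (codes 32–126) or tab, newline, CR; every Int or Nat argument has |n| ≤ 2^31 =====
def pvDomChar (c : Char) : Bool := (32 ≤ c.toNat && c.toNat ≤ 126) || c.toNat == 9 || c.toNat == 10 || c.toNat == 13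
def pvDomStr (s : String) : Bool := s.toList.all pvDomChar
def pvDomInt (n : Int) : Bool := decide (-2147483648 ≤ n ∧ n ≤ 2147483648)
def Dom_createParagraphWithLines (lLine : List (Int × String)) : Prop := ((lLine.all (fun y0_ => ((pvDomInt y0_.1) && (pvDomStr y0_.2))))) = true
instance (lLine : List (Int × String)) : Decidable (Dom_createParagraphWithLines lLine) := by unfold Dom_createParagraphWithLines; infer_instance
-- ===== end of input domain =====

-- B replaces A's single running-offset loop with processed-strings pass + prefix-sum pass + zip (alternative decomposition, same cost).

-- shared primitive helpers (both Pythons call .rstrip("\r\n") and .endswith((" ", "\xa0", "-", "–", "—")))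
-- s.rstrip("\r\n"): drop trailing '\r'/'\n' characters — exact (rstrip with an explicit char set strips any mix of those chars from the right)
def pvRstripCRLF (cs : List Char) : List Char :=
  ((cs.reverse).dropWhile (fun c => c == '\r' || c == '\n')).reverse

-- s.endswith((" ", "\xa0", "-", "–", "—")): true iff s ends with any of the five one-char suffixes — exact
def pvEndsHyphen (cs : List Char) : Bool :=
  PySem.Chars.endswith cs [' '] || PySem.Chars.endswith cs ['\u00A0'] ||
  PySem.Chars.endswith cs ['-'] || PySem.Chars.endswith cs ['\u2013'] || PySem.Chars.endswith cs ['\u2014']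

-- ===== PORT A =====
-- loop body of A: state = (sText as char list, lLineSet, nLine, n)
def pvStepA (N : Int) (st : List Char × List (Int × Int × Int) × Int × Int) (p : Int × String) :
    List Char × List (Int × Int × Int) × Int × Int :=
  let s0 := pvRstripCRLF p.2.toList
  let s := if decide (st.2.2.1 < N) && !(pvEndsHyphen s0) then s0 ++ [' '] else s0
  (st.1 ++ s, st.2.1 ++ [(p.1, st.2.2.2, st.2.2.2 + (s.length : Int))], st.2.2.1 + 1, st.2.2.2 + (s.length : Int))

def createParagraphWithLines (lLine : List (Int × String)) : String × (List (Int × Int × Int)) :=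
  let r := lLine.foldl (pvStepA (lLine.length : Int)) ([], [], 1, 0)
  (String.mk r.1, r.2.1)

-- ===== PORT B =====
-- per-line processing of Source B's first loop (i != last decides the trailing space)
def pvStepB (lastI : Int) (p : Int × (Int × String)) : List Char :=
  let s := pvRstripCRLF p.2.2.toList
  if (p.1 != lastI) && !(pvEndsHyphen s) then s ++ [' '] else s

def createParagraphWithLines_alt (lLine : List (Int × String)) : String × (List (Int × Int × Int)) :=
  let lastI : Int := (lLine.length : Int) - 1
  let lProcessed : List (List Char) := (PySem.List.enumerate lLine).map (pvStepB lastI)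
  let starts : List Int :=
    (lProcessed.foldl (fun st s => (st.1 ++ [st.2 + (s.length : Int)], st.2 + (s.length : Int))) ([(0 : Int)], (0 : Int))).1
  let lLineSet := (lLine.zip (lProcessed.zip starts)).map
    (fun q => (q.1.1, q.2.2, q.2.2 + ((q.2.1.length : Int))))
  (String.mk (PySem.Chars.join [] lProcessed), lLineSet)

-- ===== PRECONDITION & SPEC =====
def Spec_createParagraphWithLines (lLine : List (Int × String)) (out : String × (List (Int × Int × Int))) : Prop := out = createParagraphWithLines_alt lLine
instance (lLine : List (Int × String)) (out : String × (List (Int × Int × Int))) : Decidable (Spec_createParagraphWithLines lLine out) := by unfold Spec_createParagraphWithLines; infer_instance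

-- ===== CLAIM (what is proved, stated in full; the proofs are below) =====
def Claim_equal_createParagraphWithLines : Prop := ∀ (lLine : List (Int × String)), Dom_createParagraphWithLines lLine → Spec_createParagraphWithLines lLine (createParagraphWithLines lLine)

-- ===== LEMMAS AND PROOFS =====

-- reference recursion: j = 0-based index of the head, n = running offset
def pvRef (N : Int) : Int → Int → List (Int × String) → List Char × List (Int × Int × Int)
  | _, _, [] => ([], [])
  | j, n, (num, s) :: ys =>
      let t0 := pvRstripCRLF s.toList
      let t := if decide (j + 1 < N) && !(pvEndsHyphen t0) then t0 ++ [' '] else t0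
      let r := pvRef N (j + 1) (n + (t.length : Int)) ys
      (t ++ r.1, (num, n, n + (t.length : Int)) :: r.2)

-- the per-position prefix-sum tail: pvTails n ls = [n + |ls₀|, n + |ls₀| + |ls₁|, …]
def pvTails (n : Int) : List (List Char) → List Int
  | [] => []
  | s :: ls => (n + (s.length : Int)) :: pvTails (n + (s.length : Int)) ls

theorem pvFoldA_ref (N : Int) (ys : List (Int × String)) :
    ∀ (txt : List Char) (acc : List (Int × Int × Int)) (j n : Int),
      ys.foldl (pvStepA N) (txt, acc, j + 1, n) =
        (txt ++ (pvRef N j n ys).1, acc ++ (pvRef N j n ys).2,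
          j + 1 + (ys.length : Int), n + ((pvRef N j n ys).1.length : Int)) := by
  induction ys with
  | nil => intro txt acc j n; simp [pvRef]
  | cons y ys ih =>
      intro txt acc j n
      obtain ⟨num, s⟩ := y
      simp only [List.foldl_cons, pvStepA, pvRef]
      rw [show j + 1 + 1 = (j + 1) + 1 from rfl, ih]
      simp only [List.append_assoc, List.length_append, List.length_cons]
      refine Prod.ext rfl (Prod.ext ?_ (Prod.ext (by push_cast; ring) (by push_cast; ring)))
      simp

theorem pvFoldStarts (ls : List (List Char)) :
    ∀ (acc : List Int) (n : Int),
      (ls.foldl (fun st s => (st.1 ++ [st.2 + (s.length : Int)], st.2 + (s.length : Int))) (acc, n)).1 =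
        acc ++ pvTails n ls := by
  induction ls with
  | nil => intro acc n; simp [pvTails]
  | cons s ls ih =>
      intro acc n
      simp only [List.foldl_cons, pvTails]
      rw [ih]
      simp

theorem pvJoinNil (ls : List (List Char)) : PySem.Chars.join [] ls = ls.flatten := by
  induction ls with
  | nil => simp [PySem.Chars.join, List.intercalate]
  | cons s ls ih =>
      cases ls <;> simp_all [PySem.Chars.join, List.intercalate, List.intersperse]

-- head condition bridge: with j + 1 ≤ N, "index ≠ last" and "nLine < N" agree
theorem pvCondEq (j N : Int) (h : j + 1 ≤ N) : (j != N - 1) = decide (j + 1 < N) := by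
  by_cases hc : j + 1 < N
  · have hne : j ≠ N - 1 := by omega
    simp [hc, hne]
  · have he : j = N - 1 := by omega
    simp [he]

theorem pvB_ref (N : Int) (ys : List (Int × String)) :
    ∀ (j n : Int), j + (ys.length : Int) = N →
      (((PySem.List.enumerate ys j).map (pvStepB (N - 1))).flatten = (pvRef N j n ys).1) ∧
      ((ys.zip (((PySem.List.enumerate ys j).map (pvStepB (N - 1))).zip
          (n :: pvTails n ((PySem.List.enumerate ys j).map (pvStepB (N - 1)))))).map
        (fun q => (q.1.1, q.2.2, q.2.2 + ((q.2.1.length : Int)))) = (pvRef N j n ys).2) := by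
  induction ys with
  | nil => intro j n h; simp [pvRef, PySem.List.enumerate_nil]
  | cons y ys ih =>
      intro j n h
      obtain ⟨num, s⟩ := y
      simp only [List.length_cons] at h
      have hle : j + 1 ≤ N := by push_cast at h ⊢; omega
      have hcond : pvStepB (N - 1) (j, (num, s)) =
          (if decide (j + 1 < N) && !(pvEndsHyphen (pvRstripCRLF s.toList)) then
            pvRstripCRLF s.toList ++ [' '] else pvRstripCRLF s.toList) := by
        simp only [pvStepB, pvCondEq j N hle]
      have htail := ih (j + 1) (n + ((pvStepB (N - 1) (j, (num, s))).length : Int))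
        (by push_cast at h ⊢; omega)
      simp only [PySem.List.enumerate_cons, List.map_cons, List.flatten_cons, pvTails,
        List.zip_cons_cons, List.map_cons, pvRef]
      rw [hcond] at htail ⊢
      exact ⟨by rw [htail.1], by rw [htail.2]⟩

-- ===== VERDICT (by name: the statement is the Claim_ definition above) =====
theorem createParagraphWithLines_spec : Claim_equal_createParagraphWithLines := by
  intro lLine _
  unfold Spec_createParagraphWithLines createParagraphWithLines createParagraphWithLines_alt
  have hA := pvFoldA_ref (lLine.length : Int) lLine [] [] 0 0
  simp only [zero_add] at hA
  have hB := pvB_ref (lLine.length : Int) lLine 0 0 (by simp)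
  simp only [hA, List.nil_append, pvFoldStarts, pvJoinNil, List.singleton_append]
  rw [← hB.1, ← hB.2]
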